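-- pv_equiv track=rewrite | github.com/GlassyFoozle/TrtDnnSplitting | src/splitting/selective_split.py | compute_merge_groups
-- ===== SOURCE A (Python) =====
-- from typing import List, Sequence, Tuple
--
-- def compute_merge_groups(mask: List[int]) -> List[List[int]]:
--     """
--     Given a boundary mask of length N-1, return a list of groups.
--     Each group is a list of consecutive base-chunk indices.
--
--     boundary i connects chunk i and chunk i+1.
--     If mask[i] == 1  → keep split → end current group, start new one.
--     If mask[i] == 0  → merge    → continue current group.
--     """
--     n_chunks = len(mask) + 1
--     groups: List[List[int]] = []
--     current: List[int] = [0]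
--     for boundary_idx, bit in enumerate(mask):
--         if bit == 1:
--             groups.append(current)
--             current = [boundary_idx + 1]
--         else:
--             current.append(boundary_idx + 1)
--     groups.append(current)
--     return groups
-- ===== SOURCE B (Python) =====
-- from typing import List
--
-- def compute_merge_groups(mask: List[int]) -> List[List[int]]:
--     cuts = [i + 1 for i, bit in enumerate(mask) if bit == 1]
--     starts = [0] + cuts
--     ends = cuts + [len(mask) + 1]
--     return [list(range(start, end)) for start, end in zip(starts, ends)]
-- ===== Notes on version B (the rewrite author's own statement) =====
-- stated objective: alternative
-- what changed: Replaces the single accumulating scan (mutable current group appended element by element) by a find-boundaries-then-slice pass: collect all cut points i+1 where mask[i]==1, pair consecutive boundaries, and emit each group as a range.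
import Mathlib
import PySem

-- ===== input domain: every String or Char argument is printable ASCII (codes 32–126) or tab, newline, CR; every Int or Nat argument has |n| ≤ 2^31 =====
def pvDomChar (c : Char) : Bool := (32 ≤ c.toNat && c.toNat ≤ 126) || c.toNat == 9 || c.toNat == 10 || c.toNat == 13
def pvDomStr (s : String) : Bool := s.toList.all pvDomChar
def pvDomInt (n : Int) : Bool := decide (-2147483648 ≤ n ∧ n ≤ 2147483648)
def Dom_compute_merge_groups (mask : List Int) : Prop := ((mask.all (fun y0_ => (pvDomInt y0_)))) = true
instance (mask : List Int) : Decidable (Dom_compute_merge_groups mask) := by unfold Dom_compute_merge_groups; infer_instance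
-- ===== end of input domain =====

-- B replaces A's single accumulating scan by a find-cut-points-then-ranges pass; objective: alternative decomposition, same cost.

-- ===== PORT A =====
-- A's for loop over enumerate(mask) with state (groups, current); boundary_idx carried explicitly.
def cmgLoopA : List Int → Int → List (List Int) × List Int → List (List Int) × List Int
  | [], _, st => st
  | bit :: rest, idx, (groups, current) =>
      if bit = 1 then cmgLoopA rest (idx + 1) (groups ++ [current], [idx + 1])
      else cmgLoopA rest (idx + 1) (groups, current ++ [idx + 1])

def compute_merge_groups (mask : List Int) : List (List Int) :=
  let st := cmgLoopA mask 0 ([], [0])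
  st.1 ++ [st.2]

-- ===== PORT B =====
-- cuts = [i+1 for i, bit in enumerate(mask) if bit == 1]
def cmgCuts : List Int → Int → List Int
  | [], _ => []
  | bit :: rest, idx => if bit = 1 then (idx + 1) :: cmgCuts rest (idx + 1) else cmgCuts rest (idx + 1)

def compute_merge_groups_alt (mask : List Int) : List (List Int) :=
  let cuts := cmgCuts mask 0
  let starts := 0 :: cuts
  let ends := cuts ++ [(mask.length : Int) + 1]
  (starts.zip ends).map (fun p => PySem.List.pyRange p.1 p.2 1)

-- ===== PRECONDITION & SPEC =====
def Spec_compute_merge_groups (mask : List Int) (out : List (List Int)) : Prop := out = compute_merge_groups_alt mask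
instance (mask : List Int) (out : List (List Int)) : Decidable (Spec_compute_merge_groups mask out) := by unfold Spec_compute_merge_groups; infer_instance

-- ===== CLAIM (what is proved, stated in full; the proofs are below) =====
def Claim_equal_compute_merge_groups : Prop := ∀ (mask : List Int), Dom_compute_merge_groups mask → Spec_compute_merge_groups mask (compute_merge_groups mask)

-- ===== LEMMAS AND PROOFS =====

-- Invariant: running A's loop from index k with current group = range s (k+1) (s ≤ k)
-- yields the accumulated groups followed by B's boundary-pair ranges starting at s, k.
theorem cmg_main (mask : List Int) :
    ∀ (groups : List (List Int)) (s k : Int), s ≤ k →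
      (cmgLoopA mask k (groups, PySem.List.pyRange s (k + 1) 1)).1
        ++ [(cmgLoopA mask k (groups, PySem.List.pyRange s (k + 1) 1)).2]
      = groups ++ ((s :: cmgCuts mask k).zip (cmgCuts mask k ++ [k + mask.length + 1])).map
          (fun p => PySem.List.pyRange p.1 p.2 1) := by
  induction mask with
  | nil =>
      intro groups s k _
      simp [cmgLoopA, cmgCuts]
  | cons bit rest ih =>
      intro groups s k hsk
      by_cases hb : bit = 1
      · have h1 : PySem.List.pyRange (k + 1) (k + 1 + 1) 1 = [k + 1] :=
          PySem.List.pyRange_one_singleton (k + 1)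
        have step := ih (groups ++ [PySem.List.pyRange s (k + 1) 1]) (k + 1) (k + 1) le_rfl
        simp only [cmgLoopA, cmgCuts, hb, reduceIte, List.length_cons, Nat.cast_add, Nat.cast_one]
        rw [show k + ((rest.length : Int) + 1) + 1 = k + 1 + (rest.length : Int) + 1 from by ring]
        rw [show ([k + 1] : List Int) = PySem.List.pyRange (k + 1) (k + 1 + 1) 1 from h1.symm]
        rw [step]
        simp [List.zip_cons_cons, List.append_assoc]
      · have hext : PySem.List.pyRange s (k + 1) 1 ++ [k + 1] = PySem.List.pyRange s (k + 1 + 1) 1 :=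
          (PySem.List.pyRange_one_succ_right (show s ≤ k + 1 by omega)).symm
        have step := ih groups s (k + 1) (by omega)
        simp only [cmgLoopA, cmgCuts, hb, reduceIte, List.length_cons, Nat.cast_add, Nat.cast_one]
        rw [show k + ((rest.length : Int) + 1) + 1 = k + 1 + (rest.length : Int) + 1 from by ring]
        rw [hext, step]

-- ===== VERDICT (by name: the statement is the Claim_ definition above) =====
theorem compute_merge_groups_spec : Claim_equal_compute_merge_groups := by
  intro mask _
  unfold Spec_compute_merge_groups compute_merge_groups compute_merge_groups_alt
  have h0 : ([0] : List Int) = PySem.List.pyRange 0 (0 + 1) 1 := by decide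
  rw [h0]
  have := cmg_main mask [] 0 0 le_rfl
  simp only [List.nil_append] at this
  rw [this]
  norm_num
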